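-- pv_equiv track=rewrite | github.com/Stefan13610/TGP | scripts/ex203_N0_acyclicity_chain.py | check_no_ancestor_circularity
-- ===== SOURCE A (Python) =====
-- from collections import defaultdict, deque
--
-- def ancestors_of(node, parents):
--     """BFS upward to collect all ancestors of a node."""
--     visited = set()
--     queue = deque(parents.get(node, set()))
--     while queue:
--         n = queue.popleft()
--         if n in visited:
--             continue
--         visited.add(n)
--         for p in parents.get(n, set()):
--             queue.append(p)
--     return visited
--
-- def check_no_ancestor_circularity(nodes, parents, children):
--     """For every edge src->tgt, verify tgt is NOT an ancestor of src."""
--     violations = []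
--     for src in children:
--         src_ancestors = ancestors_of(src, parents)
--         for tgt in children[src]:
--             if tgt in src_ancestors:
--                 violations.append((src, tgt))
--     return violations
-- ===== SOURCE B (Python) =====
-- def check_no_ancestor_circularity(nodes, parents, children):
--     """For every edge src->tgt, verify tgt is NOT an ancestor of src.
--
--     Instead of a BFS with an explicit queue per source, compute each ancestor
--     set by saturating it to a fixed point: repeatedly add all parents of the
--     current set until nothing new appears."""
--     violations = []
--     for src in children:
--         anc = set(parents.get(src, ()))
--         while True:
--             new = {p for n in anc for p in parents.get(n, ()) if p not in anc}
--             if not new: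
--                 break
--             anc |= new
--         violations += [(src, t) for t in children[src] if t in anc]
--     return violations
-- ===== Notes on version B (the rewrite author's own statement) =====
-- stated objective: alternative
-- what changed: Per-source queue-based BFS over the parent relation is replaced by a round-based fixed-point saturation of the ancestor set (add all parents of the current set until nothing new appears), and the inner append-loop by a filter/map comprehension.
import Mathlib
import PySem

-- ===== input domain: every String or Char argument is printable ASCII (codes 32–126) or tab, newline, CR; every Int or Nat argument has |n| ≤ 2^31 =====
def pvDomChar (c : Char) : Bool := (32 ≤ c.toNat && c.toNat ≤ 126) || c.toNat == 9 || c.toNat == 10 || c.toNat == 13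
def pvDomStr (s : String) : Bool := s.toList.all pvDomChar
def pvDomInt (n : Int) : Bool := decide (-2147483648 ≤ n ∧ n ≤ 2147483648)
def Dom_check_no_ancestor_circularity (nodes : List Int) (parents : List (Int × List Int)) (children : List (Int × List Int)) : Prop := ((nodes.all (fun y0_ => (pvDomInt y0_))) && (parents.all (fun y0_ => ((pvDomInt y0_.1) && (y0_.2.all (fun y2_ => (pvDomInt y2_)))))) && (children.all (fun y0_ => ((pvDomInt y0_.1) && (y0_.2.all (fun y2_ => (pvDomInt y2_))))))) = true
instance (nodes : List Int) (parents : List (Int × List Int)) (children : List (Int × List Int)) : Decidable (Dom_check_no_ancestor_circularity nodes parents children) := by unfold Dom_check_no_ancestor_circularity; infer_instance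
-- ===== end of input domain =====

-- B replaces the per-source queue BFS by a fixed-point saturation of the ancestor set (alternative algorithm, same result).

-- ===== PORT A =====
-- shared helper: `d.get(n, set())` / `d[n]` on an association list (first match, default empty list)
def pvGet : List (Int × List Int) → Int → List Int
  | [], _ => []
  | (k, v) :: rest, n => if k == n then v else pvGet rest n

-- all ints occurring in a dict (keys and value elements); used only as a termination measure
def pvUniv (P : List (Int × List Int)) : List Int := P.flatMap (fun kv => kv.1 :: kv.2)

-- termination-measure facts cited by the decreasing_by proofs below
theorem pvGet_subset_univ {P : List (Int × List Int)} {n x : Int} (h : x ∈ pvGet P n) :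
    x ∈ pvUniv P := by
  induction P with
  | nil => simp [pvGet] at h
  | cons kv rest ih =>
    obtain ⟨k, v⟩ := kv
    simp only [pvGet] at h
    by_cases hk : (k == n) = true
    · rw [if_pos hk] at h
      exact List.mem_flatMap.mpr ⟨(k, v), List.mem_cons_self, List.mem_cons_of_mem _ h⟩
    · rw [if_neg hk] at h
      obtain ⟨kv', hkv', hx⟩ := List.mem_flatMap.mp (ih h)
      exact List.mem_flatMap.mpr ⟨kv', List.mem_cons_of_mem _ hkv', hx⟩

theorem pvGet_key_univ {P : List (Int × List Int)} {n : Int} (h : pvGet P n ≠ []) :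
    n ∈ pvUniv P := by
  induction P with
  | nil => simp [pvGet] at h
  | cons kv rest ih =>
    obtain ⟨k, v⟩ := kv
    simp only [pvGet] at h
    by_cases hk : (k == n) = true
    · have hkn : k = n := by simpa using hk
      exact List.mem_flatMap.mpr ⟨(k, v), List.mem_cons_self, by simp [hkn]⟩
    · rw [if_neg hk] at h
      obtain ⟨kv', hkv', hx⟩ := List.mem_flatMap.mp (ih h)
      exact List.mem_flatMap.mpr ⟨kv', List.mem_cons_of_mem _ hkv', hx⟩

-- the BFS loop of ancestors_of: pop n; skip if visited, else mark visited and enqueue its parents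
def pvBfs (P : List (Int × List Int)) (queue : List Int) (visited : PySem.Set Int) :
    PySem.Set Int :=
  match queue with
  | [] => visited
  | n :: q =>
    if n ∈ visited then pvBfs P q visited
    else pvBfs P (q ++ pvGet P n) (PySem.Set.add visited n)
termination_by ((((pvUniv P).toFinset \ visited.toFinset).card, queue.length) : Nat × Nat)
decreasing_by
  · exact Prod.Lex.right _ (Nat.lt_succ_self _)
  · rename_i hn
    by_cases hU : n ∈ (pvUniv P).toFinset
    · apply Prod.Lex.left
      apply Finset.card_lt_card
      constructor
      · intro x hx
        simp only [Finset.mem_sdiff, List.mem_toFinset] at hx ⊢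
        refine ⟨hx.1, fun hxv => hx.2 ?_⟩
        simp [PySem.Set.add]
        split
        · exact hxv
        · exact List.mem_append_left _ hxv
      · intro hsub
        have hmem : n ∈ (pvUniv P).toFinset \ visited.toFinset := by
          simp only [Finset.mem_sdiff, List.mem_toFinset]
          exact ⟨by simpa using hU, hn⟩
        have := hsub hmem
        simp only [Finset.mem_sdiff, List.mem_toFinset] at this
        exact this.2 (by simp [PySem.Set.mem_add])
    · have hget : pvGet P n = [] := by
        by_contra hne
        exact hU (by simpa using pvGet_key_univ hne)
      have hcard : ((pvUniv P).toFinset \ (PySem.Set.add visited n).toFinset).card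
          = ((pvUniv P).toFinset \ visited.toFinset).card := by
        congr 1
        ext x
        simp only [Finset.mem_sdiff, List.mem_toFinset]
        constructor
        · intro ⟨h1, h2⟩
          refine ⟨h1, fun hv => h2 ?_⟩
          rw [PySem.Set.mem_add]; exact Or.inl hv
        · intro ⟨h1, h2⟩
          refine ⟨h1, fun hv => ?_⟩
          rw [PySem.Set.mem_add] at hv
          rcases hv with hv | rfl
          · exact h2 hv
          · exact hU (by simpa using h1)
      rw [hcard, hget]
      exact Prod.Lex.right _ (by simp)

def check_no_ancestor_circularity (nodes : List Int) (parents : List (Int × List Int))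
    (children : List (Int × List Int)) : List (Int × Int) :=
  children.foldl (fun violations kv =>
    let src := kv.1
    let srcAncestors := pvBfs parents (pvGet parents src) PySem.Set.empty
    (pvGet children src).foldl
      (fun acc tgt => if tgt ∈ srcAncestors then acc ++ [(src, tgt)] else acc) violations) []

-- ===== PORT B =====
-- saturation loop: new = {p for n in anc for p in parents.get(n, ()) if p not in anc}; stop when empty
def pvNew (P : List (Int × List Int)) (anc : PySem.Set Int) : PySem.Set Int :=
  PySem.Set.ofList ((anc.flatMap (pvGet P)).filter (fun p => p ∉ anc))

def pvSat (P : List (Int × List Int)) (anc : PySem.Set Int) : PySem.Set Int :=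
  if pvNew P anc = [] then anc else pvSat P (PySem.Set.update anc (pvNew P anc))
termination_by ((pvUniv P).toFinset \ anc.toFinset).card
decreasing_by
  rename_i hne
  rw [pvNew] at hne
  apply Finset.card_lt_card
  have hgrow : ∀ (l : List Int) (s : PySem.Set Int) (x : Int),
      x ∈ s ∨ x ∈ l → x ∈ PySem.Set.update s l := by
    intro l
    induction l with
    | nil => intro s x hx; simpa using hx.resolve_right (by simp)
    | cons a l ih =>
      intro s x hx
      show x ∈ PySem.Set.update (PySem.Set.add s a) l
      apply ih
      rcases hx with hx | hx
      · exact Or.inl (by rw [PySem.Set.mem_add]; exact Or.inl hx)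
      · rcases List.mem_cons.mp hx with rfl | hx
        · exact Or.inl (by rw [PySem.Set.mem_add]; exact Or.inr rfl)
        · exact Or.inr hx
  obtain ⟨x, hx⟩ := List.exists_mem_of_ne_nil _ hne
  have hx' := (PySem.Set.mem_ofList _ _).mp hx
  rw [List.mem_filter] at hx'
  obtain ⟨n, hn, hxn⟩ := List.mem_flatMap.mp hx'.1
  have hxU : x ∈ pvUniv P := pvGet_subset_univ hxn
  have hxanc : x ∉ anc := by simpa using hx'.2
  constructor
  · intro y hy
    simp only [Finset.mem_sdiff, List.mem_toFinset] at hy ⊢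
    exact ⟨hy.1, fun hv => hy.2 (hgrow _ _ _ (Or.inl hv))⟩
  · intro hsub
    have hmem : x ∈ (pvUniv P).toFinset \ anc.toFinset := by
      simp only [Finset.mem_sdiff, List.mem_toFinset]
      exact ⟨hxU, hxanc⟩
    have := hsub hmem
    simp only [Finset.mem_sdiff, List.mem_toFinset] at this
    exact this.2 (hgrow _ _ _ (Or.inr ((PySem.Set.mem_ofList _ _).mpr (List.mem_filter.mpr hx'))))

def check_no_ancestor_circularity_alt (nodes : List Int) (parents : List (Int × List Int))
    (children : List (Int × List Int)) : List (Int × Int) :=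
  children.foldl (fun violations kv =>
    let src := kv.1
    let anc := pvSat parents (PySem.Set.ofList (pvGet parents src))
    violations ++ ((pvGet children src).filter (fun t => t ∈ anc)).map (fun t => (src, t))) []

-- ===== PRECONDITION & SPEC =====
def Spec_check_no_ancestor_circularity (nodes : List Int) (parents : List (Int × List Int)) (children : List (Int × List Int)) (out : List (Int × Int)) : Prop := out = check_no_ancestor_circularity_alt nodes parents children
instance (nodes : List Int) (parents : List (Int × List Int)) (children : List (Int × List Int)) (out : List (Int × Int)) : Decidable (Spec_check_no_ancestor_circularity nodes parents children out) := by unfold Spec_check_no_ancestor_circularity; infer_instance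

-- ===== CLAIM (what is proved, stated in full; the proofs are below) =====
def Claim_equal_check_no_ancestor_circularity : Prop := ∀ (nodes : List Int) (parents : List (Int × List Int)) (children : List (Int × List Int)), Dom_check_no_ancestor_circularity nodes parents children → Spec_check_no_ancestor_circularity nodes parents children (check_no_ancestor_circularity nodes parents children)

-- ===== LEMMAS AND PROOFS =====

-- one step of the parent relation: b is a parent of a
def pvEdge (P : List (Int × List Int)) (a b : Int) : Prop := b ∈ pvGet P a

theorem pv_mem_update {l : List Int} {s : PySem.Set Int} {x : Int} :
    x ∈ PySem.Set.update s l ↔ x ∈ s ∨ x ∈ l := by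
  induction l generalizing s with
  | nil => simp [PySem.Set.update]
  | cons a l ih =>
    show x ∈ PySem.Set.update (PySem.Set.add s a) l ↔ _
    rw [ih, PySem.Set.mem_add]
    simp only [List.mem_cons]
    tauto

-- the saturation loop computes exactly the nodes reachable (along parent edges) from the start set
theorem pvSat_mem (P : List (Int × List Int)) (anc : PySem.Set Int) (t : Int) :
    t ∈ pvSat P anc ↔ ∃ s ∈ anc, Relation.ReflTransGen (pvEdge P) s t := by
  fun_induction pvSat P anc with
  | case1 anc hemp =>
    constructor
    · intro ht; exact ⟨t, ht, Relation.ReflTransGen.refl⟩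
    · rintro ⟨s, hs, hR⟩
      have hclosed : ∀ n ∈ anc, ∀ p ∈ pvGet P n, p ∈ anc := by
        intro n hn p hp
        by_contra hpa
        have hpnew : p ∈ pvNew P anc := by
          rw [pvNew, PySem.Set.mem_ofList, List.mem_filter]
          exact ⟨List.mem_flatMap.mpr ⟨n, hn, hp⟩, by simpa using hpa⟩
        rw [hemp] at hpnew
        simp at hpnew
      induction hR with
      | refl => exact hs
      | tail _ hbc ih => exact hclosed _ ih _ hbc
  | case2 anc hemp ih =>
    rw [ih]
    constructor
    · rintro ⟨s, hs, hR⟩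
      rcases pv_mem_update.mp hs with hs | hs
      · exact ⟨s, hs, hR⟩
      · rw [pvNew] at hs
        have hs' := (PySem.Set.mem_ofList _ _).mp hs
        rw [List.mem_filter] at hs'
        obtain ⟨n, hn, hsn⟩ := List.mem_flatMap.mp hs'.1
        exact ⟨n, hn, Relation.ReflTransGen.head hsn hR⟩
    · rintro ⟨s, hs, hR⟩
      exact ⟨s, pv_mem_update.mpr (Or.inl hs), hR⟩

-- if every parent of a visited node is visited or queued, then anything reachable from a
-- visited node is visited or reachable from the queue
theorem pvBfs_reach_aux (P : List (Int × List Int)) (q : List Int) (v : PySem.Set Int)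
    (hinv : ∀ n ∈ v, ∀ p ∈ pvGet P n, p ∈ v ∨ p ∈ q) (t : Int) :
    ∀ a, Relation.ReflTransGen (pvEdge P) a t → a ∈ v →
      t ∈ v ∨ ∃ u ∈ q, Relation.ReflTransGen (pvEdge P) u t := by
  intro a h
  induction h using Relation.ReflTransGen.head_induction_on with
  | refl => intro ha; exact Or.inl ha
  | head hab hbt ih =>
    intro ha
    rcases hinv _ ha _ hab with hb | hb
    · exact ih hb
    · exact Or.inr ⟨_, hb, hbt⟩

-- the BFS loop, under its invariant, visits exactly: old visited plus everything reachable from the queue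
theorem pvBfs_mem (P : List (Int × List Int)) (queue : List Int) (visited : PySem.Set Int) :
    (∀ n ∈ visited, ∀ p ∈ pvGet P n, p ∈ visited ∨ p ∈ queue) →
    ∀ t, (t ∈ pvBfs P queue visited ↔
      t ∈ visited ∨ ∃ s ∈ queue, Relation.ReflTransGen (pvEdge P) s t) := by
  induction queue, visited using pvBfs.induct P with
  | case1 v =>
    intro _ t
    simp [pvBfs]
  | case2 v n q hn ih =>
    intro hinv t
    have hinv' : ∀ m ∈ v, ∀ p ∈ pvGet P m, p ∈ v ∨ p ∈ q := by
      intro m hm p hp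
      rcases hinv m hm p hp with h | h
      · exact Or.inl h
      · rcases List.mem_cons.mp h with rfl | h
        · exact Or.inl hn
        · exact Or.inr h
    rw [pvBfs, if_pos hn, ih hinv' t]
    constructor
    · rintro (h | ⟨s, hs, hR⟩)
      · exact Or.inl h
      · exact Or.inr ⟨s, List.mem_cons_of_mem _ hs, hR⟩
    · rintro (h | ⟨s, hs, hR⟩)
      · exact Or.inl h
      · rcases List.mem_cons.mp hs with rfl | hs
        · exact pvBfs_reach_aux P q v hinv' t s hR hn
        · exact Or.inr ⟨s, hs, hR⟩
  | case3 v n q hn ih =>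
    intro hinv t
    have hinv' : ∀ m ∈ PySem.Set.add v n, ∀ p ∈ pvGet P m,
        p ∈ PySem.Set.add v n ∨ p ∈ q ++ pvGet P n := by
      intro m hm p hp
      rcases (PySem.Set.mem_add _ _ _).mp hm with hm | rfl
      · rcases hinv m hm p hp with h | h
        · exact Or.inl ((PySem.Set.mem_add _ _ _).mpr (Or.inl h))
        · rcases List.mem_cons.mp h with rfl | h
          · exact Or.inl ((PySem.Set.mem_add _ _ _).mpr (Or.inr rfl))
          · exact Or.inr (List.mem_append_left _ h)
      · exact Or.inr (List.mem_append_right _ hp)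
    rw [pvBfs, if_neg hn, ih hinv' t]
    constructor
    · rintro (h | ⟨s, hs, hR⟩)
      · rcases (PySem.Set.mem_add _ _ _).mp h with h | rfl
        · exact Or.inl h
        · exact Or.inr ⟨t, List.mem_cons_self, Relation.ReflTransGen.refl⟩
      · rcases List.mem_append.mp hs with hs | hs
        · exact Or.inr ⟨s, List.mem_cons_of_mem _ hs, hR⟩
        · exact Or.inr ⟨n, List.mem_cons_self, Relation.ReflTransGen.head hs hR⟩
    · rintro (h | ⟨s, hs, hR⟩)
      · exact Or.inl ((PySem.Set.mem_add _ _ _).mpr (Or.inl h))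
      · rcases List.mem_cons.mp hs with rfl | hs
        · rcases Relation.ReflTransGen.cases_head hR with rfl | ⟨m, hm, hmt⟩
          · exact Or.inl ((PySem.Set.mem_add _ _ _).mpr (Or.inr rfl))
          · exact Or.inr ⟨m, List.mem_append_right _ hm, hmt⟩
        · exact Or.inr ⟨s, List.mem_append_left _ hs, hR⟩

-- A's ancestor set and B's ancestor set have the same members
theorem pv_anc_eq (P : List (Int × List Int)) (src t : Int) :
    (t ∈ pvBfs P (pvGet P src) PySem.Set.empty ↔
      t ∈ pvSat P (PySem.Set.ofList (pvGet P src))) := by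
  rw [pvBfs_mem P (pvGet P src) PySem.Set.empty
      (by intro n hn; simp [PySem.Set.empty] at hn) t,
    pvSat_mem]
  constructor
  · rintro (h | ⟨s, hs, hR⟩)
    · simp [PySem.Set.empty] at h
    · exact ⟨s, (PySem.Set.mem_ofList _ _).mpr hs, hR⟩
  · rintro ⟨s, hs, hR⟩
    exact Or.inr ⟨s, (PySem.Set.mem_ofList _ _).mp hs, hR⟩

-- A's inner append loop is an append of a filtered map
theorem pv_inner_eq (S : PySem.Set Int) (src : Int) (l : List Int) (acc : List (Int × Int)) :
    l.foldl (fun acc tgt => if tgt ∈ S then acc ++ [(src, tgt)] else acc) acc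
      = acc ++ (l.filter (fun t => t ∈ S)).map (fun t => (src, t)) := by
  induction l generalizing acc with
  | nil => simp
  | cons a l ih =>
    by_cases h : a ∈ S
    · simp only [List.foldl_cons, if_pos h, List.filter_cons, decide_eq_true h, ih]
      simp
    · simp only [List.foldl_cons, if_neg h, List.filter_cons]
      rw [decide_eq_false h]
      simp [ih]

theorem pv_outer_eq (parents children : List (Int × List Int)) (acc : List (Int × Int)) :
    children.foldl (fun violations kv =>
        let src := kv.1
        let srcAncestors := pvBfs parents (pvGet parents src) PySem.Set.empty
        (pvGet children src).foldl
          (fun acc tgt => if tgt ∈ srcAncestors then acc ++ [(src, tgt)] else acc) violations) acc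
    = children.foldl (fun violations kv =>
        let src := kv.1
        let anc := pvSat parents (PySem.Set.ofList (pvGet parents src))
        violations ++ ((pvGet children src).filter (fun t => t ∈ anc)).map (fun t => (src, t))) acc := by
  have key : ∀ (inner : List (Int × List Int)) (acc : List (Int × Int)),
      inner.foldl (fun violations kv =>
        (pvGet children kv.1).foldl
          (fun acc tgt => if tgt ∈ pvBfs parents (pvGet parents kv.1) PySem.Set.empty
            then acc ++ [(kv.1, tgt)] else acc) violations) acc
      = inner.foldl (fun violations kv =>
        violations ++ ((pvGet children kv.1).filter
            (fun t => t ∈ pvSat parents (PySem.Set.ofList (pvGet parents kv.1)))).map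
          (fun t => (kv.1, t))) acc := by
    intro inner
    induction inner with
    | nil => intro acc; rfl
    | cons kv rest ih =>
      intro acc
      simp only [List.foldl_cons]
      rw [pv_inner_eq, ih]
      have hf : List.filter (fun t => decide (t ∈ pvBfs parents (pvGet parents kv.1) PySem.Set.empty)) (pvGet children kv.1)
          = List.filter (fun t => decide (t ∈ pvSat parents (PySem.Set.ofList (pvGet parents kv.1)))) (pvGet children kv.1) := by
        apply List.filter_congr
        intro a _
        simp only [decide_eq_decide]
        exact pv_anc_eq parents kv.1 a
      rw [hf]
  exact key children acc

-- ===== VERDICT (by name: the statement is the Claim_ definition above) =====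
theorem check_no_ancestor_circularity_spec : Claim_equal_check_no_ancestor_circularity := by
  intro nodes parents children _
  show check_no_ancestor_circularity nodes parents children
      = check_no_ancestor_circularity_alt nodes parents children
  unfold check_no_ancestor_circularity check_no_ancestor_circularity_alt
  exact pv_outer_eq parents children []
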